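-- pv_equiv track=rewrite | github.com/vbnm95/dagr-web | api/dagr_bit_align.py | non_overlapping_parts_masks
-- ===== SOURCE A (Python) =====
-- from typing import Dict, List, Optional, Sequence, Tuple
--
-- def non_overlapping_parts_masks(masks: Sequence[int]) -> List[int]:
--     parts: List[int] = []
--     for i, mi in enumerate(masks):
--         others_union = 0
--         for j, mj in enumerate(masks):
--             if i != j:
--                 others_union |= mj
--         parts.append(mi & ~others_union)
--     return parts
-- ===== SOURCE B (Python) =====
-- def non_overlapping_parts_masks(masks):
--     masks = list(masks)
--     n = len(masks)
--     suf = [0] * (n + 1)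
--     for k in range(n - 1, -1, -1):
--         suf[k] = suf[k + 1] | masks[k]
--     out = []
--     pref = 0
--     for k in range(n):
--         out.append(masks[k] & ~(pref | suf[k + 1]))
--         pref |= masks[k]
--     return out
-- ===== Notes on version B (the rewrite author's own statement) =====
-- stated objective: faster
-- what changed: Replaces the quadratic 'for each i, OR all other masks' double loop by one suffix-OR array plus a running prefix OR, so each element's others-union is one OR of two precomputed values.
import Mathlib
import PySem

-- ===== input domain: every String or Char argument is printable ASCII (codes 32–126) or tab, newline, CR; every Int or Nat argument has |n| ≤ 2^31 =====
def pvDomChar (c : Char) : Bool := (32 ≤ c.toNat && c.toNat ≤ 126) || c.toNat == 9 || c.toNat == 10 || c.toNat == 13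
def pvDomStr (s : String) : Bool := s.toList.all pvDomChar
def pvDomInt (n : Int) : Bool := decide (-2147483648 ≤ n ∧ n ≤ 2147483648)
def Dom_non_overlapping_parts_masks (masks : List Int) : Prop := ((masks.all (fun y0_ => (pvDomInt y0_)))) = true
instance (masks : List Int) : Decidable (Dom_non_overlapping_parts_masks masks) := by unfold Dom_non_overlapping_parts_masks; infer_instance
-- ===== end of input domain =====

-- B replaces A's quadratic double loop by one suffix-OR array plus a running prefix OR (objective: faster).

-- ===== PORT A =====
def non_overlapping_parts_masks (masks : List Int) : List Int :=
  (PySem.List.enumerate masks).foldl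
    (fun parts p =>
      let others_union :=
        (PySem.List.enumerate masks).foldl
          (fun acc q => if p.1 ≠ q.1 then PySem.Int.bor acc q.2 else acc) 0
      parts ++ [PySem.Int.band p.2 (Int.not others_union)]) []

-- ===== PORT B =====
-- suffix-OR list: pvSufB l = [suf 0, suf 1, …, suf n] with suf k = OR of l.drop k (Source B's suf array)
def pvSufB : List Int → List Int
  | [] => [0]
  | m :: rest => PySem.Int.bor ((pvSufB rest).headD 0) m :: pvSufB rest

-- Source B's second loop: running prefix OR, consuming the masks together with the suffix-OR tail
def pvGoB : Int → List Int → List Int → List Int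
  | _, [], _ => []
  | pref, m :: ms, sufs =>
      PySem.Int.band m (Int.not (PySem.Int.bor pref (sufs.headD 0)))
        :: pvGoB (PySem.Int.bor pref m) ms sufs.tail

def non_overlapping_parts_masks_alt (masks : List Int) : List Int :=
  pvGoB 0 masks (pvSufB masks).tail

-- ===== PRECONDITION & SPEC =====
def Spec_non_overlapping_parts_masks (masks : List Int) (out : List Int) : Prop := out = non_overlapping_parts_masks_alt masks
instance (masks : List Int) (out : List Int) : Decidable (Spec_non_overlapping_parts_masks masks out) := by unfold Spec_non_overlapping_parts_masks; infer_instance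

-- ===== CLAIM (what is proved, stated in full; the proofs are below) =====
def Claim_equal_non_overlapping_parts_masks : Prop := ∀ (masks : List Int), Dom_non_overlapping_parts_masks masks → Spec_non_overlapping_parts_masks masks (non_overlapping_parts_masks masks)

-- ===== LEMMAS AND PROOFS =====

-- ## bitwise infrastructure: associativity of PySem.Int.bor, via Int.testBit

theorem pvTestBitLdiff (n m k : Nat) :
    (Nat.ldiff n m).testBit k = (n.testBit k && !m.testBit k) := by
  unfold Nat.ldiff
  exact Nat.testBit_bitwise (by simp) n m k

theorem pvAndAddLdiff : ∀ n m : Nat, (n &&& m) + Nat.ldiff n m = n := by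
  intro n
  induction n using Nat.strong_induction_on with
  | _ n ih =>
    intro m
    rcases Nat.eq_zero_or_pos n with h0 | hpos
    · subst h0
      simp [Nat.ldiff]
    · have h2 : n / 2 < n := Nat.div_lt_self hpos (by norm_num)
      have IH := ih (n / 2) h2 (m / 2)
      have hA : (n &&& m) / 2 = n / 2 &&& m / 2 := Nat.and_div_two
      have hD : Nat.ldiff n m / 2 = Nat.ldiff (n / 2) (m / 2) := by
        have := @Nat.bitwise_div_two_pow (fun a b => a && !b) n m 1 (by simp)
        simpa [Nat.ldiff] using this
      have pA : (n &&& m) % 2 = (n.testBit 0 && m.testBit 0).toNat := by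
        have h := Nat.toNat_testBit (n &&& m) 0
        rw [Nat.testBit_and] at h
        simpa using h.symm
      have pD : Nat.ldiff n m % 2 = (n.testBit 0 && !m.testBit 0).toNat := by
        have h := Nat.toNat_testBit (Nat.ldiff n m) 0
        rw [pvTestBitLdiff] at h
        simpa using h.symm
      have pN : n % 2 = (n.testBit 0).toNat := by
        have h := Nat.toNat_testBit n 0
        simpa using h.symm
      have e1 := Nat.div_add_mod (n &&& m) 2
      have e2 := Nat.div_add_mod (Nat.ldiff n m) 2
      have e3 := Nat.div_add_mod n 2
      cases hb : n.testBit 0 <;> cases hc : m.testBit 0 <;>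
        simp only [hb, hc, Bool.and_false, Bool.and_true, Bool.not_false, Bool.not_true,
          Bool.toNat_false, Bool.toNat_true] at pA pD pN <;> omega

theorem pvSubAnd (n m : Nat) : n - (n &&& m) = Nat.ldiff n m := by
  have := pvAndAddLdiff n m; omega

theorem pvTestBitBor (a b : Int) (k : Nat) :
    (PySem.Int.bor a b).testBit k = (a.testBit k || b.testBit k) := by
  cases a with
  | ofNat m =>
    cases b with
    | ofNat n =>
      show (PySem.Int.bor (↑m) (↑n)).testBit k = _
      rw [PySem.Int.bor]
      rw [if_pos (by positivity), if_pos (by positivity)]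
      simp [Int.testBit, Nat.testBit_or]
    | negSucc n =>
      show (PySem.Int.bor (↑m) (Int.negSucc n)).testBit k = _
      rw [PySem.Int.bor]
      rw [if_pos (by positivity), if_neg (by omega)]
      have h1 : (-(Int.negSucc n) - 1).toNat = n := by
        rw [Int.negSucc_eq]; omega
      have h2 : (-(↑(n - (n &&& m)) : Int) - 1) = Int.negSucc (n - (n &&& m)) := by
        rw [Int.negSucc_eq]; ring
      rw [h1, Int.toNat_natCast, h2]
      rw [pvSubAnd n m]
      cases hm : m.testBit k <;> cases hn : n.testBit k <;>
        simp [Int.testBit, hm, hn]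
  | negSucc m =>
    cases b with
    | ofNat n =>
      show (PySem.Int.bor (Int.negSucc m) (↑n)).testBit k = _
      rw [PySem.Int.bor]
      rw [if_neg (by omega), if_pos (by positivity)]
      have h1 : (-(Int.negSucc m) - 1).toNat = m := by
        rw [Int.negSucc_eq]; omega
      have h2 : (-(↑(m - (m &&& n)) : Int) - 1) = Int.negSucc (m - (m &&& n)) := by
        rw [Int.negSucc_eq]; ring
      rw [h1, Int.toNat_natCast, h2]
      rw [pvSubAnd m n]
      cases hm : m.testBit k <;> cases hn : n.testBit k <;>
        simp [Int.testBit, hm, hn]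
    | negSucc n =>
      show (PySem.Int.bor (Int.negSucc m) (Int.negSucc n)).testBit k = _
      rw [PySem.Int.bor]
      rw [if_neg (by omega), if_neg (by omega)]
      have h1 : (-(Int.negSucc m) - 1).toNat = m := by
        rw [Int.negSucc_eq]; omega
      have h1' : (-(Int.negSucc n) - 1).toNat = n := by
        rw [Int.negSucc_eq]; omega
      have h2 : (-(↑(m &&& n) : Int) - 1) = Int.negSucc (m &&& n) := by
        rw [Int.negSucc_eq]; ring
      rw [h1, h1', h2]
      cases hm : m.testBit k <;> cases hn : n.testBit k <;>
        simp [Int.testBit, Nat.testBit_and, hm, hn]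

theorem pvIntExt (a b : Int) (h : ∀ k, a.testBit k = b.testBit k) : a = b := by
  cases a with
  | ofNat m =>
    cases b with
    | ofNat n =>
      have : m = n := Nat.eq_of_testBit_eq fun i => by
        have := h i; simpa [Int.testBit] using this
      simp [this]
    | negSucc n =>
      exfalso
      have hk := h (m + n)
      have hm : m.testBit (m + n) = false :=
        Nat.testBit_lt_two_pow (lt_of_le_of_lt (Nat.le_add_right m n) Nat.lt_two_pow_self)
      have hn : n.testBit (m + n) = false :=
        Nat.testBit_lt_two_pow (lt_of_le_of_lt (Nat.le_add_left n m) Nat.lt_two_pow_self)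
      simp [Int.testBit, hm, hn] at hk
  | negSucc m =>
    cases b with
    | ofNat n =>
      exfalso
      have hk := h (m + n)
      have hm : m.testBit (m + n) = false :=
        Nat.testBit_lt_two_pow (lt_of_le_of_lt (Nat.le_add_right m n) Nat.lt_two_pow_self)
      have hn : n.testBit (m + n) = false :=
        Nat.testBit_lt_two_pow (lt_of_le_of_lt (Nat.le_add_left n m) Nat.lt_two_pow_self)
      simp [Int.testBit, hm, hn] at hk
    | negSucc n =>
      have : m = n := Nat.eq_of_testBit_eq fun i => by
        have := h i; simpa [Int.testBit] using this
      simp [this]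

theorem pvBorAssoc (a b c : Int) :
    PySem.Int.bor (PySem.Int.bor a b) c = PySem.Int.bor a (PySem.Int.bor b c) := by
  apply pvIntExt
  intro k
  simp [pvTestBitBor, Bool.or_assoc]

theorem pvZeroBor (a : Int) : PySem.Int.bor 0 a = a := by
  rw [PySem.Int.bor_comm]; exact PySem.Int.bor_zero a

-- ## common reference form: running prefix OR with a recomputed suffix OR

def pvOrAll : List Int → Int
  | [] => 0
  | m :: ms => PySem.Int.bor m (pvOrAll ms)

def pvRef : Int → List Int → List Int
  | _, [] => []
  | pref, m :: ms =>
      PySem.Int.band m (Int.not (PySem.Int.bor pref (pvOrAll ms)))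
        :: pvRef (PySem.Int.bor pref m) ms

-- ## B = pvRef

theorem pvSufHead (l : List Int) : (pvSufB l).headD 0 = pvOrAll l := by
  induction l with
  | nil => rfl
  | cons m ms ih =>
    simp only [pvSufB, List.headD_cons, pvOrAll, ih]
    exact PySem.Int.bor_comm _ _

theorem pvGoBRef (l : List Int) : ∀ pref, pvGoB pref l (pvSufB l).tail = pvRef pref l := by
  induction l with
  | nil => intro pref; rfl
  | cons m ms ih =>
    intro pref
    show pvGoB pref (m :: ms) (pvSufB ms) = _
    cases hms : pvSufB ms with
    | nil => cases ms <;> simp [pvSufB] at hms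
    | cons s rest =>
      have hhead : s = pvOrAll ms := by
        have h := pvSufHead ms
        rw [hms] at h
        simpa using h
      have htail := ih (PySem.Int.bor pref m)
      rw [hms] at htail
      simp only [List.tail_cons] at htail
      simp only [pvGoB, pvRef, List.tail_cons, List.headD_cons]
      rw [hhead, htail]

theorem pvAltRef (masks : List Int) : non_overlapping_parts_masks_alt masks = pvRef 0 masks := by
  unfold non_overlapping_parts_masks_alt
  exact pvGoBRef masks 0

-- ## A = pvRef

def pvInner (full : List Int) (i : Int) : Int :=
  (PySem.List.enumerate full).foldl
    (fun acc q => if i ≠ q.1 then PySem.Int.bor acc q.2 else acc) 0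

def pvOuter (full : List Int) (es : List (Int × Int)) (parts : List Int) : List Int :=
  es.foldl
    (fun parts p => parts ++ [PySem.Int.band p.2 (Int.not (pvInner full p.1))]) parts

theorem pvOrAllAppend (l1 l2 : List Int) :
    pvOrAll (l1 ++ l2) = PySem.Int.bor (pvOrAll l1) (pvOrAll l2) := by
  induction l1 with
  | nil => simp [pvOrAll, pvZeroBor]
  | cons m ms ih => simp [pvOrAll, ih, pvBorAssoc]

theorem pvNoskip (l : List Int) : ∀ (s i : Int) (acc : Int), i < s →
    ((PySem.List.enumerate l s).foldl
       (fun acc q => if i ≠ q.1 then PySem.Int.bor acc q.2 else acc) acc)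
      = PySem.Int.bor acc (pvOrAll l) := by
  induction l with
  | nil => intro s i acc _; simp [PySem.List.enumerate_nil, pvOrAll, PySem.Int.bor_zero]
  | cons m ms ih =>
    intro s i acc h
    rw [PySem.List.enumerate_cons]
    simp only [List.foldl_cons]
    rw [if_pos (by intro he; omega)]
    rw [ih (s + 1) i _ (by omega)]
    simp [pvOrAll, pvBorAssoc]

theorem pvSkip (l : List Int) : ∀ (s : Int) (k : Nat) (acc : Int), k < l.length →
    ((PySem.List.enumerate l s).foldl
       (fun acc q => if (s + (k : Int)) ≠ q.1 then PySem.Int.bor acc q.2 else acc) acc)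
      = PySem.Int.bor acc
          (PySem.Int.bor (pvOrAll (l.take k)) (pvOrAll (l.drop (k + 1)))) := by
  induction l with
  | nil => intro s k acc h; simp at h
  | cons m ms ih =>
    intro s k acc h
    rw [PySem.List.enumerate_cons]
    simp only [List.foldl_cons]
    cases k with
    | zero =>
      simp only [Nat.cast_zero, add_zero]
      rw [if_neg (by simp)]
      rw [pvNoskip ms (s + 1) s acc (by omega)]
      simp [pvOrAll, pvZeroBor]
    | succ k =>
      rw [if_pos (by push_cast; omega)]
      have hih := ih (s + 1) k (PySem.Int.bor acc m) (by simpa using h)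
      rw [show (s + (((k : Nat) + 1 : Nat) : Int)) = ((s + 1) + (k : Int)) by omega]
      rw [hih]
      simp [List.take_succ_cons, List.drop_succ_cons, pvOrAll, pvBorAssoc]

theorem pvTakeApp (l1 : List Int) (m : Int) (ms : List Int) :
    (l1 ++ m :: ms).take l1.length = l1 := by
  induction l1 with
  | nil => rfl
  | cons a as ih => simp [ih]

theorem pvDropApp (l1 : List Int) (m : Int) (ms : List Int) :
    (l1 ++ m :: ms).drop (l1.length + 1) = ms := by
  induction l1 with
  | nil => rfl
  | cons a as ih => simp [ih]

theorem pvInnerEq (l1 : List Int) (m : Int) (ms : List Int) :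
    pvInner (l1 ++ m :: ms) (l1.length : Int)
      = PySem.Int.bor (pvOrAll l1) (pvOrAll ms) := by
  unfold pvInner
  have h := pvSkip (l1 ++ m :: ms) 0 l1.length 0 (by simp only [List.length_append, List.length_cons]; omega)
  rw [show ((0 : Int) + (l1.length : Int)) = (l1.length : Int) by ring] at h
  rw [h, pvZeroBor, pvTakeApp, pvDropApp]

theorem pvMainA (l2 : List Int) : ∀ (l1 : List Int) (parts : List Int),
    pvOuter (l1 ++ l2) (PySem.List.enumerate l2 (l1.length : Int)) parts
      = parts ++ pvRef (pvOrAll l1) l2 := by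
  induction l2 with
  | nil => intro l1 parts; simp [pvOuter, PySem.List.enumerate_nil, pvRef]
  | cons m ms ih =>
    intro l1 parts
    rw [PySem.List.enumerate_cons]
    unfold pvOuter
    simp only [List.foldl_cons]
    have hstart : ((l1.length : Int) + 1) = ((l1 ++ [m]).length : Int) := by
      simp
    have hfull : l1 ++ m :: ms = (l1 ++ [m]) ++ ms := by simp
    rw [pvInnerEq l1 m ms]
    rw [hstart, hfull]
    rw [show ((PySem.List.enumerate ms ((l1 ++ [m]).length : Int)).foldl
          (fun parts p => parts ++ [PySem.Int.band p.2 (Int.not (pvInner ((l1 ++ [m]) ++ ms) p.1))])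
          (parts ++ [PySem.Int.band m (Int.not (PySem.Int.bor (pvOrAll l1) (pvOrAll ms)))]))
        = pvOuter ((l1 ++ [m]) ++ ms) (PySem.List.enumerate ms ((l1 ++ [m]).length : Int))
            (parts ++ [PySem.Int.band m (Int.not (PySem.Int.bor (pvOrAll l1) (pvOrAll ms)))]) from rfl]
    rw [ih (l1 ++ [m])]
    rw [pvOrAllAppend l1 [m]]
    simp [pvRef, pvOrAll, PySem.Int.bor_zero]

theorem pvAEq (masks : List Int) : non_overlapping_parts_masks masks = pvRef 0 masks := by
  have h0 : non_overlapping_parts_masks masks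
      = pvOuter masks (PySem.List.enumerate masks 0) [] := rfl
  have h := pvMainA masks [] []
  simp only [List.nil_append, List.length_nil, Int.natCast_zero] at h
  rw [h0, h]
  rfl

-- ===== VERDICT (by name: the statement is the Claim_ definition above) =====
theorem non_overlapping_parts_masks_spec : Claim_equal_non_overlapping_parts_masks := by
  intro masks _
  unfold Spec_non_overlapping_parts_masks
  rw [pvAEq, pvAltRef]
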